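-- pv_equiv track=rewrite | github.com/Avis20/learn | python/_ya/interview/2023-06-15.py | func
-- ===== SOURCE A (Python) =====
-- from typing import Literal
--
-- def func(row: list[Literal[1, 0]]):
--     count = 0
--     max = 0
--     prev = None
--     for i in row:
--         if i == 0:
--             if prev and prev == 1:
--                 count += 2
--             else:
--                 count += 1
--         else:
--             if max < count:
--                 max = count
--             count = 0
--         prev = i
--     if max < count:
--         max = count
--     return max // 2
-- ===== SOURCE B (Python) =====
-- def func(row):
--     # Build the maximal runs of equal values as [value, length, element_before_run],
--     # then reduce: each zero-run weighs length (+1 if the element before it is 1).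
--     runs = []
--     prev = None
--     for x in row:
--         if runs and runs[-1][0] == x:
--             runs[-1][1] += 1
--         else:
--             runs.append([x, 1, prev])
--         prev = x
--     weights = [k + (1 if p == 1 else 0) for v, k, p in runs if v == 0]
--     return (max(weights) if weights else 0) // 2
-- ===== Notes on version B (the rewrite author's own statement) =====
-- stated objective: alternative
-- what changed: Replaces A's inline prev/count/max state machine with a two-phase decomposition: first group the row into maximal runs (value, length, element-before-run), then reduce over the zero-runs' weights and take max(weights, default 0) // 2.
import Mathlib
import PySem

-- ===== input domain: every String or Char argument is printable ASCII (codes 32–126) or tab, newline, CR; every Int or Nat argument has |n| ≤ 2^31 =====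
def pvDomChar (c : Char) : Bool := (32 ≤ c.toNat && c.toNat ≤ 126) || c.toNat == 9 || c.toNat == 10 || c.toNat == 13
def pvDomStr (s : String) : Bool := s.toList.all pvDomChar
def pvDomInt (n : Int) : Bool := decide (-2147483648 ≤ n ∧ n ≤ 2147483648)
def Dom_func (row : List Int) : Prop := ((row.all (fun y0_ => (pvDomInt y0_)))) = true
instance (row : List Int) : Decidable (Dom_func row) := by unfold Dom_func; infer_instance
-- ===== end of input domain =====

-- B replaces A's inline prev/count state machine by building the maximal runs first and
-- reducing over per-run weights (objective: alternative decomposition, same cost).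

-- ===== PORT A =====
-- A's loop state: (count, max, prev).  Python's `prev and prev == 1` holds iff prev is
-- non-None, truthy and equal to 1, i.e. iff prev = some 1 (1 itself is truthy).
def funcStep (st : Int × Int × Option Int) (i : Int) : Int × Int × Option Int :=
  if i = 0 then
    (if st.2.2 = some 1 then st.1 + 2 else st.1 + 1, st.2.1, some i)
  else
    (0, if st.2.1 < st.1 then st.1 else st.2.1, some i)

def func (row : List Int) : Int :=
  let s := row.foldl funcStep (0, 0, none)
  PySem.Int.floordiv (if s.2.1 < s.1 then s.1 else s.2.1) 2

-- ===== PORT B =====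
-- Source B's runs list is built here head-first (newest run at the head) and reversed
-- afterwards to Python's append order; a run is (value, length, element before the run).
def runStep (st : List (Int × Int × Option Int) × Option Int) (x : Int) :
    List (Int × Int × Option Int) × Option Int :=
  match st.1 with
  | r :: rest => if r.1 = x then ((r.1, r.2.1 + 1, r.2.2) :: rest, some x)
                 else ((x, 1, st.2) :: r :: rest, some x)
  | [] => ([(x, 1, st.2)], some x)

def runWeight (r : Int × Int × Option Int) : Int :=
  r.2.1 + (if r.2.2 = some 1 then 1 else 0)

def func_alt (row : List Int) : Int :=
  let runs := (row.foldl runStep ([], none)).1.reverse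
  let weights := (runs.filter (fun r => r.1 == 0)).map runWeight
  PySem.Int.floordiv
    (match PySem.List.max? weights (fun w => w) with
     | some m => m
     | none => 0) 2

-- ===== PRECONDITION & SPEC =====
def Spec_func (row : List Int) (out : Int) : Prop := out = func_alt row
instance (row : List Int) (out : Int) : Decidable (Spec_func row out) := by unfold Spec_func; infer_instance

-- ===== CLAIM (what is proved, stated in full; the proofs are below) =====
def Claim_equal_func : Prop := ∀ (row : List Int), Dom_func row → Spec_func row (func row)

-- ===== LEMMAS AND PROOFS =====

-- running max over the zero-run weights of a run list
def zmax (a : Int) (runs : List (Int × Int × Option Int)) : Int :=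
  runs.foldl (fun m r => if r.1 = 0 then max m (runWeight r) else m) a

-- the invariant tying A's state (count, max, prev) to B's state (runs, prev)
def InvAB (s : Int × Int × Option Int) (t : List (Int × Int × Option Int) × Option Int) : Prop :=
  s.2.2 = t.2 ∧ (∀ r ∈ t.1, 1 ≤ r.2.1) ∧
  (match t.1 with
   | [] => t.2 = none ∧ s.1 = 0 ∧ s.2.1 = 0
   | r :: rest => t.2 = some r.1 ∧
       (if r.1 = 0 then s.1 = runWeight r ∧ s.2.1 = zmax 0 rest
        else s.1 = 0 ∧ s.2.1 = zmax 0 (r :: rest)))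

theorem zmax_cons (a : Int) (r : Int × Int × Option Int) (t : List (Int × Int × Option Int)) :
    zmax a (r :: t) = zmax (if r.1 = 0 then max a (runWeight r) else a) t := rfl

theorem zmax_init (a b : Int) (l : List (Int × Int × Option Int)) :
    zmax (max a b) l = max (zmax a l) b := by
  induction l generalizing a with
  | nil => simp [zmax]
  | cons r t ih =>
    by_cases h : r.1 = 0
    · rw [zmax_cons, zmax_cons, if_pos h, if_pos h, max_right_comm, ih]
    · rw [zmax_cons, zmax_cons, if_neg h, if_neg h]; exact ih a

theorem le_zmax (a : Int) (l : List (Int × Int × Option Int)) : a ≤ zmax a l := by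
  induction l generalizing a with
  | nil => simp [zmax]
  | cons r t ih =>
    by_cases h : r.1 = 0
    · rw [zmax_cons, if_pos h]; exact le_trans (le_max_left _ _) (ih _)
    · rw [zmax_cons, if_neg h]; exact ih a

theorem runWeight_pos (r : Int × Int × Option Int) (h : 1 ≤ r.2.1) : 1 ≤ runWeight r := by
  unfold runWeight; split <;> omega

theorem runStep_nil (q : Option Int) (x : Int) :
    runStep ([], q) x = ([(x, 1, q)], some x) := rfl

theorem runStep_eq (r : Int × Int × Option Int) (rest : List (Int × Int × Option Int))
    (q : Option Int) (x : Int) (h : r.1 = x) :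
    runStep (r :: rest, q) x = ((r.1, r.2.1 + 1, r.2.2) :: rest, some x) := by
  simp [runStep, h]

theorem runStep_ne (r : Int × Int × Option Int) (rest : List (Int × Int × Option Int))
    (q : Option Int) (x : Int) (h : ¬ r.1 = x) :
    runStep (r :: rest, q) x = ((x, 1, q) :: r :: rest, some x) := by
  simp [runStep, h]

theorem funcStep_zero (c m : Int) (p : Option Int) :
    funcStep (c, m, p) 0 = (if p = some 1 then c + 2 else c + 1, m, some 0) := by
  simp [funcStep]

theorem funcStep_nz (c m : Int) (p : Option Int) (x : Int) (h : ¬ x = 0) :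
    funcStep (c, m, p) x = (0, if m < c then c else m, some x) := by
  simp [funcStep, h]

theorem InvAB_cons (s : Int × Int × Option Int) (r : Int × Int × Option Int)
    (rest : List (Int × Int × Option Int)) (q : Option Int) :
    InvAB s (r :: rest, q) ↔
      s.2.2 = q ∧ (∀ u ∈ r :: rest, 1 ≤ u.2.1) ∧ q = some r.1 ∧
        (if r.1 = 0 then s.1 = runWeight r ∧ s.2.1 = zmax 0 rest
         else s.1 = 0 ∧ s.2.1 = zmax 0 (r :: rest)) := Iff.rfl

theorem inv_step (s : Int × Int × Option Int) (t : List (Int × Int × Option Int) × Option Int)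
    (x : Int) (h : InvAB s t) : InvAB (funcStep s x) (runStep t x) := by
  obtain ⟨c, m, p⟩ := s
  obtain ⟨runs, q⟩ := t
  obtain ⟨hprev, hlen, hrest⟩ := h
  simp only at hprev
  subst hprev
  cases runs with
  | nil =>
    obtain ⟨hq, hc, hm⟩ := hrest
    simp only at hq hc hm
    subst hq hc hm
    rw [runStep_nil]
    by_cases hx : x = 0
    · subst hx
      rw [funcStep_zero, if_neg (by simp), InvAB_cons]
      refine ⟨rfl, by simp, rfl, ?_⟩
      rw [if_pos rfl]
      exact ⟨by simp [runWeight], rfl⟩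
    · rw [funcStep_nz _ _ _ _ hx, InvAB_cons]
      refine ⟨rfl, by simp, rfl, ?_⟩
      rw [if_neg hx]
      exact ⟨rfl, by simp [zmax, hx]⟩
  | cons r rest =>
    obtain ⟨hq, hcase⟩ := hrest
    simp only at hq
    subst hq
    by_cases hx : x = 0
    · subst hx
      by_cases hr : r.1 = 0
      · -- current zero run extended by another 0
        rw [if_pos hr] at hcase
        obtain ⟨hc, hm⟩ := hcase
        subst hc hm
        rw [runStep_eq r rest _ 0 hr, funcStep_zero,
            if_neg (by simp [hr]), InvAB_cons]
        refine ⟨rfl, ?_, by rw [hr], ?_⟩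
        · intro u hu
          rcases List.mem_cons.mp hu with hu | hu
          · subst hu
            have := hlen r (List.mem_cons_self ..)
            show 1 ≤ r.2.1 + 1
            omega
          · exact hlen u (List.mem_cons_of_mem _ hu)
        · rw [if_pos hr]
          exact ⟨by simp [runWeight]; ring, rfl⟩
      · -- nonzero run ends, a zero run starts
        rw [if_neg hr] at hcase
        obtain ⟨hc, hm⟩ := hcase
        subst hc hm
        rw [runStep_ne r rest _ 0 hr, funcStep_zero, InvAB_cons]
        refine ⟨rfl, ?_, rfl, ?_⟩
        · intro u hu
          rcases List.mem_cons.mp hu with hu | hu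
          · subst hu; exact le_refl 1
          · exact hlen u hu
        · rw [if_pos rfl]
          constructor
          · show (if some r.1 = some 1 then (0:Int) + 2 else 0 + 1) = runWeight (0, 1, some r.1)
            by_cases h1 : r.1 = 1 <;> simp [runWeight, h1]
          · rfl
    · by_cases hr : r.1 = x
      · -- nonzero run extended (r.1 = x ≠ 0)
        have hr0 : ¬ r.1 = 0 := hr ▸ hx
        rw [if_neg hr0] at hcase
        obtain ⟨hc, hm⟩ := hcase
        subst hc hm
        rw [runStep_eq r rest _ x hr, funcStep_nz _ _ _ _ hx, InvAB_cons]
        refine ⟨rfl, ?_, by rw [hr], ?_⟩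
        · intro u hu
          rcases List.mem_cons.mp hu with hu | hu
          · subst hu
            have := hlen r (List.mem_cons_self ..)
            show 1 ≤ r.2.1 + 1
            omega
          · exact hlen u (List.mem_cons_of_mem _ hu)
        · rw [if_neg hr0]
          refine ⟨rfl, ?_⟩
          show (if zmax 0 (r :: rest) < 0 then 0 else zmax 0 (r :: rest)) =
            zmax 0 ((r.1, r.2.1 + 1, r.2.2) :: rest)
          have h1 : zmax 0 ((r.1, r.2.1 + 1, r.2.2) :: rest) = zmax 0 rest := by
            rw [zmax_cons]; simp [hr0]
          have h2 : zmax 0 (r :: rest) = zmax 0 rest := by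
            rw [zmax_cons, if_neg hr0]
          rw [h2, h1, if_neg (not_lt.mpr (le_zmax 0 rest))]
      · -- a new nonzero run starts
        rw [runStep_ne r rest _ x hr, funcStep_nz _ _ _ _ hx, InvAB_cons]
        refine ⟨rfl, ?_, rfl, ?_⟩
        · intro u hu
          rcases List.mem_cons.mp hu with hu | hu
          · subst hu; exact le_refl 1
          · exact hlen u hu
        · rw [if_neg hx]
          refine ⟨rfl, ?_⟩
          by_cases hr0 : r.1 = 0
          · rw [if_pos hr0] at hcase
            obtain ⟨hc, hm⟩ := hcase
            subst hc hm
            show (if zmax 0 rest < runWeight r then runWeight r else zmax 0 rest) =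
              zmax 0 ((x, 1, some r.1) :: r :: rest)
            have h1 : zmax 0 ((x, 1, some r.1) :: r :: rest) = zmax 0 (r :: rest) := by
              rw [zmax_cons]; simp [hx]
            have h2 : zmax 0 (r :: rest) = max (zmax 0 rest) (runWeight r) := by
              rw [zmax_cons, if_pos hr0, zmax_init]
            rw [h1, h2]
            rcases lt_or_ge (zmax 0 rest) (runWeight r) with hlt | hge
            · rw [if_pos hlt, max_eq_right hlt.le]
            · rw [if_neg (not_lt.mpr hge), max_eq_left hge]
          · rw [if_neg hr0] at hcase
            obtain ⟨hc, hm⟩ := hcase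
            subst hc hm
            show (if zmax 0 (r :: rest) < 0 then 0 else zmax 0 (r :: rest)) =
              zmax 0 ((x, 1, some r.1) :: r :: rest)
            have h1 : zmax 0 ((x, 1, some r.1) :: r :: rest) = zmax 0 (r :: rest) := by
              rw [zmax_cons]; simp [hx]
            rw [h1, if_neg (not_lt.mpr (le_zmax 0 (r :: rest)))]

theorem inv_fold (row : List Int) :
    InvAB (row.foldl funcStep (0, 0, none)) (row.foldl runStep ([], none)) := by
  have h0 : InvAB (0, 0, none) ([], none) := by
    refine ⟨rfl, by simp, rfl, rfl, rfl⟩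
  generalize hs : ((0:Int), (0:Int), (none : Option Int)) = s at h0 ⊢
  generalize ht : (([] : List (Int × Int × Option Int)), (none : Option Int)) = t at h0 ⊢
  clear hs ht
  induction row generalizing s t with
  | nil => exact h0
  | cons x xs ih => exact ih _ _ (inv_step _ _ _ h0)

theorem foldl_max_init (a b : Int) (l : List Int) :
    l.foldl max (max a b) = max (l.foldl max a) b := by
  induction l generalizing a with
  | nil => rfl
  | cons x t ih =>
    simp only [List.foldl]
    rw [max_right_comm, ih]

theorem foldl_max_reverse (l : List Int) (a : Int) :
    l.reverse.foldl max a = l.foldl max a := by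
  induction l generalizing a with
  | nil => rfl
  | cons x t ih =>
    simp only [List.reverse_cons, List.foldl_append, List.foldl, ih]
    rw [← foldl_max_init]

theorem zmax_eq_foldl (a : Int) (runs : List (Int × Int × Option Int)) :
    zmax a runs = ((runs.filter (fun r => r.1 == 0)).map runWeight).foldl max a := by
  induction runs generalizing a with
  | nil => rfl
  | cons r rest ih =>
    by_cases h : r.1 = 0
    · rw [zmax_cons, if_pos h]
      simp only [List.filter_cons, beq_iff_eq, h, if_true, List.map_cons, List.foldl_cons]
      exact ih _
    · rw [zmax_cons, if_neg h]
      simp only [List.filter_cons, beq_iff_eq, h]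
      exact ih a

theorem finishA_eq_finishB (s : Int × Int × Option Int)
    (t : List (Int × Int × Option Int) × Option Int) (h : InvAB s t) :
    PySem.Int.floordiv (if s.2.1 < s.1 then s.1 else s.2.1) 2 =
      PySem.Int.floordiv
        (match PySem.List.max?
            ((t.1.reverse.filter (fun r => r.1 == 0)).map runWeight) (fun w => w) with
         | some m => m
         | none => 0) 2 := by
  obtain ⟨hprev, hlen, hrest⟩ := h
  congr 1
  have key : (if s.2.1 < s.1 then s.1 else s.2.1) = zmax 0 t.1 := by
    cases hruns : t.1 with
    | nil =>
      rw [hruns] at hrest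
      obtain ⟨_, hc, hm⟩ := hrest
      rw [hc, hm]; simp [zmax]
    | cons r rest =>
      rw [hruns] at hrest
      obtain ⟨_, hcase⟩ := hrest
      by_cases hr : r.1 = 0
      · rw [if_pos hr] at hcase
        obtain ⟨hc, hm⟩ := hcase
        rw [zmax_cons, if_pos hr, zmax_init, hc, hm]
        omega
      · rw [if_neg hr] at hcase
        obtain ⟨hc, hm⟩ := hcase
        have hnn := le_zmax 0 (r :: rest)
        rw [hc, hm, if_neg (not_lt.mpr hnn)]
  rw [key, List.filter_reverse, List.map_reverse]
  set W : List Int := ((t.1.filter (fun r => r.1 == 0)).map runWeight) with hW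
  have hWel : ∀ w ∈ W, 1 ≤ w := by
    intro w hw
    rw [hW] at hw
    obtain ⟨r, hr, hwr⟩ := List.mem_map.mp hw
    exact hwr ▸ runWeight_pos r (hlen r (List.mem_filter.mp hr).1)
  have hz : zmax 0 t.1 = W.foldl max 0 := zmax_eq_foldl 0 t.1
  cases hWr : W.reverse with
  | nil =>
    have hWnil : W = [] := by simpa using congrArg List.reverse hWr
    simp [PySem.List.max?, hz, hWnil]
  | cons x xs =>
    have hmax : PySem.List.max? (x :: xs) (fun w => w) = some (xs.foldl max x) :=
      PySem.List.max?_id_cons x xs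
    have hx1 : 1 ≤ x := hWel x (List.mem_reverse.mp (by rw [hWr]; exact List.mem_cons_self ..))
    rw [hz, hmax]
    show W.foldl max 0 = xs.foldl max x
    rw [← foldl_max_reverse, hWr, List.foldl_cons, max_eq_right (by omega : (0:Int) ≤ x)]

theorem func_spec : Claim_equal_func := by
  intro row _
  show func row = func_alt row
  exact finishA_eq_finishB _ _ (inv_fold row)
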